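-- pv_equiv track=rewrite | github.com/pypi-data/pypi-mirror-173 | packages/brassica/brassica-1.0.2.tar.gz/brassica-1.0.2/brassica/brassica.py | position_of_paired_else
-- ===== SOURCE A (Python) =====
-- def position_of_paired_else(s):
--     """
--     Returns the position, within string s, of the ELSE paired with a leading
--     THEN appearing immediately before (not within) the string. Returns -1 when
--     no such ELSE exists.
--     """
--     u = s.upper()
--     k = positions_of('"', u)
--     i = unenclosed('ELSE', u, k)
--     if len(i) == 0: return -1
--     j = unenclosed('THEN', u, k)
--     if len(j) == 0: return i[0]
--     i = [u for n, u in enumerate(i) if len([1 for v in j if v < u]) == n]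
--     if len(i) == 0: return -1
--     return i[0]
--
-- def positions_of(w, s):
--     """
--     Returns all positions of word w within string s. Returns an empty list
--     when w does not appear within s. Case sensitive.
--     """
--     if len(w) > len(s): return []
--     if len(w) == 0: return list(range(len(s)))
--     return [i for i in range(len(s) - len(w) + 1) if s.startswith(w, i)]
--
-- def unenclosed(w, s, i):
--     """
--     Returns all positions of word w within string s that are not inside a pair
--     of delimiting characters (or words, typically double quotes) at positions
--     i along the same string, according to the even/odd delimiter-count rule.
--     Case sensitive. The delimiter-position list, i, can be empty. Returns an
--     empty list when there are no unenclosed occurrences of w within s.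
--     """
--     u = positions_of(w, s)
--     return [v for v in u if len([1 for j in i if j < v]) % 2 == 0]
-- ===== SOURCE B (Python) =====
-- def position_of_paired_else(s):
--     """
--     Returns the position, within string s, of the ELSE paired with a leading
--     THEN appearing immediately before (not within) the string. Returns -1 when
--     no such ELSE exists.
--     """
--     u = s.upper()
--     quotes = 0   # number of '"' seen so far
--     thens = 0    # unenclosed THENs seen so far
--     elses = 0    # unenclosed ELSEs seen so far
--     for p in range(len(u)):
--         if quotes % 2 == 0:
--             if u.startswith('ELSE', p):
--                 if thens == elses:
--                     return p
--                 elses += 1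
--             elif u.startswith('THEN', p):
--                 thens += 1
--         if u[p] == '"':
--             quotes += 1
--     return -1
-- ===== Notes on version B (the rewrite author's own statement) =====
-- stated objective: simpler
-- what changed: Replaces the build-three-position-lists-then-count-before-each-candidate pipeline (positions_of/unenclosed helpers plus a quadratic enumerate filter) with a single left-to-right scan that maintains quote parity and running counters of unenclosed THENs and ELSEs, returning at the first ELSE whose index equals the THEN count.
import Mathlib
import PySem

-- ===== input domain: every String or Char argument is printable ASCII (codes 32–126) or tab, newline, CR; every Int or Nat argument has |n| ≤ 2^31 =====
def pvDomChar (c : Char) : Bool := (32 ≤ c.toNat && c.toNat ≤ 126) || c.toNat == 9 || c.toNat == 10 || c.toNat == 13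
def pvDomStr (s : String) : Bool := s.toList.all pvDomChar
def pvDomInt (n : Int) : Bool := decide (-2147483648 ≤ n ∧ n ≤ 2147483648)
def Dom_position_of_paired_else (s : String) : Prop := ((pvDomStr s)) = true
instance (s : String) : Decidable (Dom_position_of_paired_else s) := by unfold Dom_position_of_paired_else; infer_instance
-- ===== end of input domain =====

-- B replaces A's build-position-lists-then-count pipeline with one left-to-right counting scan (simpler, no helper passes).

-- ===== PORT A =====
-- positions_of(w, s)
def pvPositionsOf (w : List Char) (s : List Char) : List Int :=
  if w.length > s.length then []
  else if w.length = 0 then PySem.List.pyRange 0 (s.length : Int) 1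
  else (PySem.List.pyRange 0 ((s.length : Int) - (w.length : Int) + 1) 1).filter
    -- s.startswith(w, i): i here is a nonnegative in-range index, so it is exactly a prefix test on s[i:]
    (fun i => PySem.Chars.startswith (s.drop i.toNat) w)

-- unenclosed(w, s, i)
def pvUnenclosed (w : List Char) (s : List Char) (i : List Int) : List Int :=
  (pvPositionsOf w s).filter
    (fun v => ((i.filter (fun j => decide (j < v))).length) % 2 == 0)

def position_of_paired_else (s : String) : Int :=
  let u := PySem.Chars.upper s.toList
  let k := pvPositionsOf ['"'] u
  let i := pvUnenclosed ['E','L','S','E'] u k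
  if i.length = 0 then -1
  else
    let j := pvUnenclosed ['T','H','E','N'] u k
    if j.length = 0 then PySem.List.pyGetD i 0 0
    else
      let i2 := ((PySem.List.enumerate i 0).filter
        (fun nu => ((j.filter (fun v => decide (v < nu.2))).length : Int) == nu.1)).map (fun nu => nu.2)
      if i2.length = 0 then -1 else PySem.List.pyGetD i2 0 0

-- ===== PORT B =====
-- the single scan: position p, quote count, unenclosed-THEN count, unenclosed-ELSE count
def pvScan : List Char → Int → Int → Int → Int → Int
  | [], _, _, _, _ => -1
  | c :: rest, p, quotes, thens, elses =>
    if quotes % 2 = 0 then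
      if PySem.Chars.startswith (c :: rest) ['E','L','S','E'] then
        if thens = elses then p
        else pvScan rest (p + 1) (quotes + if c = '"' then 1 else 0) thens (elses + 1)
      else if PySem.Chars.startswith (c :: rest) ['T','H','E','N'] then
        pvScan rest (p + 1) (quotes + if c = '"' then 1 else 0) (thens + 1) elses
      else pvScan rest (p + 1) (quotes + if c = '"' then 1 else 0) thens elses
    else pvScan rest (p + 1) (quotes + if c = '"' then 1 else 0) thens elses

def position_of_paired_else_alt (s : String) : Int :=
  pvScan (PySem.Chars.upper s.toList) 0 0 0 0

-- ===== PRECONDITION & SPEC =====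
def Spec_position_of_paired_else (s : String) (out : Int) : Prop := out = position_of_paired_else_alt s
instance (s : String) (out : Int) : Decidable (Spec_position_of_paired_else s out) := by unfold Spec_position_of_paired_else; infer_instance

-- ===== CLAIM (what is proved, stated in full; the proofs are below) =====
def Claim_equal_position_of_paired_else : Prop := ∀ (s : String), Dom_position_of_paired_else s → Spec_position_of_paired_else s (position_of_paired_else s)

-- ===== LEMMAS AND PROOFS =====

-- proof-side abstractions over the uppercased character list L
def chQ (L : List Char) (q : Nat) : Bool := L[q]? == some '"'
def cntQ (L : List Char) (p : Nat) : Nat := (List.range p).countP (chQ L)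
def isE (L : List Char) (p : Nat) : Bool := PySem.Chars.startswith (L.drop p) ['E','L','S','E']
def isT (L : List Char) (p : Nat) : Bool := PySem.Chars.startswith (L.drop p) ['T','H','E','N']
def isEU (L : List Char) (p : Nat) : Bool := isE L p && cntQ L p % 2 == 0
def isTU (L : List Char) (p : Nat) : Bool := isT L p && cntQ L p % 2 == 0
def cntE (L : List Char) (p : Nat) : Nat := (List.range p).countP (isEU L)
def cntT (L : List Char) (p : Nat) : Nat := (List.range p).countP (isTU L)
def Ifrom (L : List Char) (p : Nat) : List Nat := (List.range' p (L.length - p)).filter (isEU L)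
def bfind (L : List Char) (p : Nat) : Int :=
  match ((Ifrom L p).zipIdx (cntE L p)).find? (fun vn => cntT L vn.1 == vn.2) with
  | some vn => (vn.1 : Int)
  | none => -1

theorem countP_range_succ (p : Nat → Bool) (n : Nat) :
    (List.range (n+1)).countP p = (List.range n).countP p + (if p n then 1 else 0) := by
  simp [List.range_succ, List.countP_append]

theorem not_isT_of_isE (L : List Char) (p : Nat) (h1 : isE L p = true) : isT L p = false := by
  unfold isE at h1; unfold isT
  rw [PySem.Chars.startswith_iff] at h1
  rw [Bool.eq_false_iff]
  intro h2
  rw [PySem.Chars.startswith_iff] at h2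
  rcases h1 with ⟨t1, e1⟩; rcases h2 with ⟨t2, e2⟩
  rw [← e1] at e2; simp at e2

theorem Ifrom_succ (L : List Char) (p : Nat) (h : p < L.length) :
    Ifrom L p = (if isEU L p then [p] else []) ++ Ifrom L (p+1) := by
  unfold Ifrom
  have : L.length - p = (L.length - (p+1)) + 1 := by omega
  rw [this, List.range'_succ, List.filter_cons]
  split <;> simp

theorem chQ_eq (L : List Char) (p : Nat) (h : p < L.length) :
    chQ L p = (L[p] == '"') := by
  unfold chQ
  simp [List.getElem?_eq_getElem h]

theorem scan_eq_bfind (L : List Char) (m p : Nat) (h : L.length = p + m) :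
    pvScan (L.drop p) p (cntQ L p) (cntT L p) (cntE L p) = bfind L p := by
  induction m generalizing p with
  | zero =>
    have hd : L.drop p = [] := by
      apply List.drop_eq_nil_of_le; omega
    have hI : Ifrom L p = [] := by
      unfold Ifrom
      have : L.length - p = 0 := by omega
      simp [this]
    rw [hd]
    simp [pvScan, bfind, hI]
  | succ m ih =>
    have hp : p < L.length := by omega
    have hd : L.drop p = L[p] :: L.drop (p+1) := List.drop_eq_getElem_cons hp
    have hih := ih (p+1) (by omega)
    -- quote counter update
    have hq : (cntQ L p : Int) + (if L[p] = '"' then 1 else 0) = (cntQ L (p+1) : Int) := by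
      unfold cntQ
      rw [countP_range_succ, chQ_eq L p hp]
      push_cast
      by_cases hc : L[p] = '"' <;> simp [hc]
    have hqpar : ((cntQ L p : Int) % 2 = 0) ↔ (cntQ L p % 2 == 0) = true := by
      rw [beq_iff_eq]; omega
    have hcT : cntT L (p+1) = cntT L p + (if isTU L p then 1 else 0) := countP_range_succ _ p
    have hcE : cntE L (p+1) = cntE L p + (if isEU L p then 1 else 0) := countP_range_succ _ p
    have h1 : ((p : Int) + 1) = ((p+1 : Nat) : Int) := by push_cast; ring
    rw [hd]
    by_cases hpar : (cntQ L p : Int) % 2 = 0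
    · have hparN : (cntQ L p % 2 == 0) = true := hqpar.mp hpar
      by_cases hE : isE L p = true
      · -- unenclosed ELSE at p
        have hT : isT L p = false := not_isT_of_isE L p hE
        have hEd : PySem.Chars.startswith (L.drop p) ['E','L','S','E'] = true := by
          simpa [isE] using hE
        have hEU : isEU L p = true := by unfold isEU; simp [hE, hparN]
        have hTU : isTU L p = false := by unfold isTU; simp [hT]
        have hIf : Ifrom L p = p :: Ifrom L (p+1) := by
          rw [Ifrom_succ L p hp, hEU]; simp
        by_cases heq : (cntT L p : Int) = (cntE L p : Int)
        · have hs : pvScan (L[p] :: L.drop (p+1)) p (cntQ L p) (cntT L p) (cntE L p) = (p : Int) := by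
            simp [pvScan, hpar, hEd, heq]
          rw [hs]
          unfold bfind
          rw [hIf, List.zipIdx_cons,
            List.find?_cons_of_pos (by simp only [beq_iff_eq]; exact_mod_cast heq)]
        · have hs : pvScan (L[p] :: L.drop (p+1)) p (cntQ L p) (cntT L p) (cntE L p)
              = pvScan (L.drop (p+1)) ((p : Int) + 1) ((cntQ L p : Int) + if L[p] = '"' then 1 else 0) (cntT L p) ((cntE L p : Int) + 1) := by
            simp [pvScan, hpar, hEd, heq]
          have h2 : (cntT L p : Int) = (cntT L (p+1) : Int) := by rw [hcT, hTU]; simp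
          have h3 : ((cntE L p : Int) + 1) = (cntE L (p+1) : Int) := by rw [hcE, hEU]; push_cast; simp
          rw [hs, hq, h1, h2, h3, hih]
          unfold bfind
          rw [hIf, List.zipIdx_cons,
            List.find?_cons_of_neg (by simp only [beq_iff_eq]; intro hx; exact heq (by exact_mod_cast hx))]
          have hE1 : cntE L p + 1 = cntE L (p+1) := by rw [hcE, hEU]; simp
          rw [hE1]

      · -- no ELSE at p
        have hEd : PySem.Chars.startswith (L.drop p) ['E','L','S','E'] = false := by
          simpa [isE] using hE
        have hEU : isEU L p = false := by unfold isEU; simp [hE]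
        have hIf : Ifrom L p = Ifrom L (p+1) := by
          rw [Ifrom_succ L p hp, hEU]; simp
        have hE0 : cntE L p = cntE L (p+1) := by rw [hcE, hEU]; simp
        have hbf : bfind L p = bfind L (p+1) := by unfold bfind; rw [hIf, hE0]
        by_cases hT : isT L p = true
        · have hTU : isTU L p = true := by unfold isTU; simp [hT, hparN]
          have hTd : PySem.Chars.startswith (L.drop p) ['T','H','E','N'] = true := by
            simpa [isT] using hT
          have hs : pvScan (L[p] :: L.drop (p+1)) p (cntQ L p) (cntT L p) (cntE L p)
              = pvScan (L.drop (p+1)) ((p : Int) + 1) ((cntQ L p : Int) + if L[p] = '"' then 1 else 0) ((cntT L p : Int) + 1) (cntE L p) := by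
            simp [pvScan, hpar, hEd, hTd]
          have h2 : ((cntT L p : Int) + 1) = (cntT L (p+1) : Int) := by rw [hcT, hTU]; push_cast; simp
          have h3 : (cntE L p : Int) = (cntE L (p+1) : Int) := by rw [hE0]
          rw [hs, hq, h1, h2, h3, hih, hbf]
        · have hTU : isTU L p = false := by unfold isTU; simp [hT]
          have hTd : PySem.Chars.startswith (L.drop p) ['T','H','E','N'] = false := by
            simpa [isT] using hT
          have hs : pvScan (L[p] :: L.drop (p+1)) p (cntQ L p) (cntT L p) (cntE L p)
              = pvScan (L.drop (p+1)) ((p : Int) + 1) ((cntQ L p : Int) + if L[p] = '"' then 1 else 0) (cntT L p) (cntE L p) := by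
            simp [pvScan, hpar, hEd, hTd]
          have h2 : (cntT L p : Int) = (cntT L (p+1) : Int) := by rw [hcT, hTU]; simp
          have h3 : (cntE L p : Int) = (cntE L (p+1) : Int) := by rw [hE0]
          rw [hs, hq, h1, h2, h3, hih, hbf]
    · -- inside quotes: nothing counts
      have hparN : (cntQ L p % 2 == 0) = false := by
        rw [Bool.eq_false_iff]; intro hx; rw [beq_iff_eq] at hx; exact hpar (by omega)
      have hEU : isEU L p = false := by unfold isEU; simp [hparN]
      have hTU : isTU L p = false := by unfold isTU; simp [hparN]
      have hIf : Ifrom L p = Ifrom L (p+1) := by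
        rw [Ifrom_succ L p hp, hEU]; simp
      have hE0 : cntE L p = cntE L (p+1) := by rw [hcE, hEU]; simp
      have hbf : bfind L p = bfind L (p+1) := by unfold bfind; rw [hIf, hE0]
      have hs : pvScan (L[p] :: L.drop (p+1)) p (cntQ L p) (cntT L p) (cntE L p)
          = pvScan (L.drop (p+1)) ((p : Int) + 1) ((cntQ L p : Int) + if L[p] = '"' then 1 else 0) (cntT L p) (cntE L p) := by
        simp [pvScan, hpar]
      have h2 : (cntT L p : Int) = (cntT L (p+1) : Int) := by rw [hcT, hTU]; simp
      have h3 : (cntE L p : Int) = (cntE L (p+1) : Int) := by rw [hE0]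
      rw [hs, hq, h1, h2, h3, hih, hbf]

theorem sw_short (cs w : List Char) (h : cs.length < w.length) :
    PySem.Chars.startswith cs w = false := by
  rw [Bool.eq_false_iff]
  intro hx
  rw [PySem.Chars.startswith_iff] at hx
  have := hx.length_le
  omega

theorem sw_single (cs : List Char) (c : Char) :
    PySem.Chars.startswith cs [c] = (cs.head? == some c) := by
  rw [Bool.eq_iff_iff, PySem.Chars.startswith_iff]
  cases cs with
  | nil => simp
  | cons d t =>
    simp only [List.cons_prefix_cons, List.head?_cons, beq_iff_eq, Option.some_inj,
      List.nil_prefix, and_true]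
    exact eq_comm

theorem filter_range_extend (P : Nat → Bool) (m n : Nat) (hmn : m ≤ n)
    (hP : ∀ k, m ≤ k → k < n → P k = false) :
    (List.range n).filter P = (List.range m).filter P := by
  have hn : n = m + (n - m) := by omega
  rw [hn, List.range_add, List.filter_append]
  have h2 : ((List.range (n-m)).map (fun x => m + x)).filter P = [] := by
    rw [List.filter_eq_nil_iff]
    intro a ha
    simp only [List.mem_map, List.mem_range] at ha
    obtain ⟨x, hx, rfl⟩ := ha
    simp [hP (m+x) (by omega) (by omega)]
  rw [h2, List.append_nil]

theorem apos_eq (w : List Char) (hw : w ≠ []) (L : List Char) :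
    pvPositionsOf w L
      = ((List.range L.length).filter
          (fun p => PySem.Chars.startswith (L.drop p) w)).map (fun (k : Nat) => (k : Int)) := by
  have hw0 : 0 < w.length := List.length_pos_iff.mpr hw
  unfold pvPositionsOf
  by_cases hgt : w.length > L.length
  · rw [if_pos hgt]
    have h0 : (List.range L.length).filter
        (fun p => PySem.Chars.startswith (L.drop p) w) = [] := by
      rw [List.filter_eq_nil_iff]
      intro a ha
      simp only [List.mem_range] at ha
      have := sw_short (L.drop a) w (by rw [List.length_drop]; omega)
      simp [this]
    rw [h0, List.map_nil]
  · rw [if_neg hgt, if_neg (by omega)]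
    have hle : w.length ≤ L.length := by omega
    rw [PySem.List.pyRange_one]
    have hb : ((L.length : Int) - (w.length : Int) + 1 - 0).toNat = L.length - w.length + 1 := by
      omega
    rw [hb, List.filter_map]
    have hcong : (List.range (L.length - w.length + 1)).filter
          ((fun i : Int => PySem.Chars.startswith (L.drop i.toNat) w) ∘ (fun k : Nat => (0 : Int) + ↑k))
        = (List.range (L.length - w.length + 1)).filter
          (fun p => PySem.Chars.startswith (L.drop p) w) := by
      apply List.filter_congr
      intro x _
      simp
    rw [hcong,
      ← filter_range_extend (fun p => PySem.Chars.startswith (L.drop p) w)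
          (L.length - w.length + 1) L.length (by omega)
          (fun k hk1 hk2 => sw_short _ _ (by rw [List.length_drop]; omega))]
    apply List.map_congr_left
    intro x _
    simp

theorem cnt_lt (P : Nat → Bool) (n v : Nat) (hv : v ≤ n) :
    ((((List.range n).filter P).map (fun (k : Nat) => (k : Int))).filter
        (fun j => decide (j < (v : Int)))).length = (List.range v).countP P := by
  rw [List.filter_map, List.length_map]
  have hc : ((List.range n).filter P).filter
        ((fun j : Int => decide (j < (v : Int))) ∘ (fun k : Nat => (k : Int)))
      = ((List.range n).filter P).filter (fun k => decide (k < v)) := by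
    apply List.filter_congr
    intro x _
    simp
  rw [hc, List.filter_comm]
  have hr : (List.range n).filter (fun k => decide (k < v)) = List.range v := by
    have hn : n = v + (n - v) := by omega
    rw [hn, List.range_add, List.filter_append,
      List.filter_eq_self.mpr (by intro a ha; simp only [List.mem_range] at ha; simp; omega),
      List.filter_eq_nil_iff.mpr (by intro a ha; simp only [List.mem_map, List.mem_range] at ha; simp; omega),
      List.append_nil]
  rw [hr, List.countP_eq_length_filter]

theorem unenclosed_eq (L w : List Char) (isW : Nat → Bool) (hw : w ≠ [])
    (hisW : (fun p => PySem.Chars.startswith (L.drop p) w) = isW) :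
    pvUnenclosed w L (pvPositionsOf ['"'] L)
      = ((List.range L.length).filter (fun p => isW p && cntQ L p % 2 == 0)).map
          (fun (k : Nat) => (k : Int)) := by
  have hk : pvPositionsOf ['"'] L = ((List.range L.length).filter (chQ L)).map (fun (k : Nat) => (k : Int)) := by
    rw [apos_eq ['"'] (by simp) L]
    congr 1
    apply List.filter_congr
    intro x _
    rw [sw_single, List.head?_drop]
    rfl
  unfold pvUnenclosed
  rw [apos_eq w hw L, hisW, List.filter_map]
  congr 1
  have hstep : ((List.range L.length).filter isW).filter
        ((fun v : Int => ((pvPositionsOf ['"'] L).filter (fun j => decide (j < v))).length % 2 == 0)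
          ∘ (fun k : Nat => (k : Int)))
      = ((List.range L.length).filter isW).filter (fun p => cntQ L p % 2 == 0) := by
    apply List.filter_congr
    intro x hx
    have hxlen : x < L.length := by
      simp only [List.mem_filter, List.mem_range] at hx
      exact hx.1
    simp only [Function.comp_apply, hk]
    rw [cnt_lt (chQ L) L.length x (by omega)]
    rfl
  rw [hstep, List.filter_filter]
  apply List.filter_congr
  intro x _
  rw [Bool.and_comm]

theorem headD_form (l : List Int) :
    (if l.length = 0 then (-1 : Int) else PySem.List.pyGetD l 0 0) = l.headD (-1) := by
  cases l with
  | nil => simp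
  | cons x t =>
    rw [if_neg (by simp)]
    rw [PySem.List.pyGetD_eq_getElem _ _ (by omega) (by simp)]
    rfl

theorem countP_range_le (P : Nat → Bool) (a n : Nat) (h : a ≤ n) :
    (List.range a).countP P ≤ (List.range n).countP P := by
  have hn : n = a + (n - a) := by omega
  rw [hn, List.range_add, List.countP_append]
  omega

theorem enumfind (L : List Char) (xs : List Nat) (k : Nat) (hx : ∀ x ∈ xs, x < L.length) :
    (((PySem.List.enumerate (xs.map (fun (k : Nat) => (k : Int))) (k : Int)).filter
        (fun nu => (((((List.range L.length).filter (isTU L)).map (fun (k : Nat) => (k : Int))).filter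
            (fun v => decide (v < nu.2))).length : Int) == nu.1)).map (fun nu => nu.2)).head?.getD (-1)
      = (match (xs.zipIdx k).find? (fun vn => cntT L vn.1 == vn.2) with
        | some vn => (vn.1 : Int)
        | none => -1) := by
  induction xs generalizing k with
  | nil => simp
  | cons a t ih =>
    have ha : a < L.length := hx a List.mem_cons_self
    have hcnt := cnt_lt (isTU L) L.length a (le_of_lt ha)
    rw [List.map_cons,
      show PySem.List.enumerate ((a : Int) :: t.map (fun (k : Nat) => (k : Int))) (k : Int)
          = ((k : Int), (a : Int)) :: PySem.List.enumerate (t.map (fun (k : Nat) => (k : Int))) ((k : Int)+1)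
        from by simp [PySem.List.enumerate],
      List.filter_cons, List.zipIdx_cons, List.find?_cons]
    dsimp only
    rw [hcnt, show (List.range a).countP (isTU L) = cntT L a from rfl,
      show ((cntT L a : Int) == (k : Int)) = (cntT L a == k) from by rw [Bool.eq_iff_iff]; simp]
    cases hh : cntT L a == k with
    | true => simp
    | false =>
      simp only [Bool.false_eq_true, if_false]
      have := ih (k+1) (fun x hx' => hx x (List.mem_cons_of_mem _ hx'))
      rw [Nat.cast_add, Nat.cast_one] at this
      exact this

theorem a_eq_bfind (s : String) :
    position_of_paired_else s = bfind (PySem.Chars.upper s.toList) 0 := by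
  unfold position_of_paired_else
  set L := PySem.Chars.upper s.toList with hL
  dsimp only
  rw [unenclosed_eq L ['E','L','S','E'] (isE L) (by simp) rfl,
      unenclosed_eq L ['T','H','E','N'] (isT L) (by simp) rfl]
  have hIfrom : Ifrom L 0 = (List.range L.length).filter (isEU L) := by
    unfold Ifrom
    rw [Nat.sub_zero, ← List.range_eq_range']
  have hisEU : (fun p => isE L p && cntQ L p % 2 == 0) = isEU L := rfl
  have hisTU : (fun p => isT L p && cntQ L p % 2 == 0) = isTU L := rfl
  rw [hisEU, hisTU]
  have hcE0 : cntE L 0 = 0 := by simp [cntE]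
  cases hIU : (List.range L.length).filter (isEU L) with
  | nil => simp [bfind, hIfrom, hIU]
  | cons a tl =>
    have halen : a < L.length := by
      have : a ∈ (List.range L.length).filter (isEU L) := by rw [hIU]; exact List.mem_cons_self
      simp only [List.mem_filter, List.mem_range] at this
      exact this.1
    rw [if_neg (by simp)]
    by_cases hJU : (List.range L.length).filter (isTU L) = []
    · rw [hJU]
      rw [if_pos (by simp)]
      have hcTa : cntT L a = 0 := by
        have h0 : (List.range L.length).countP (isTU L) = 0 := by
          rw [List.countP_eq_length_filter, hJU]
          rfl
        have := countP_range_le (isTU L) a L.length (by omega)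
        unfold cntT
        omega
      rw [bfind, hIfrom, hIU, hcE0, List.zipIdx_cons,
        List.find?_cons_of_pos (by simp [hcTa])]
      rw [List.map_cons,
        PySem.List.pyGetD_eq_getElem _ _ (by omega) (by simp)]
      rfl
    · rw [if_neg (by simpa using hJU)]
      rw [headD_form, List.headD_eq_head?_getD]
      have hx : ∀ x ∈ a :: tl, x < L.length := by
        intro x hxm
        have hxf : x ∈ (List.range L.length).filter (isEU L) := by rw [hIU]; exact hxm
        simp only [List.mem_filter, List.mem_range] at hxf
        exact hxf.1
      have he := enumfind L (a :: tl) 0 hx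
      simp only [Nat.cast_zero] at he
      rw [bfind, hIfrom, hIU, hcE0]
      exact he

theorem b_eq_bfind (s : String) :
    position_of_paired_else_alt s = bfind (PySem.Chars.upper s.toList) 0 := by
  unfold position_of_paired_else_alt
  have h := scan_eq_bfind (PySem.Chars.upper s.toList) (PySem.Chars.upper s.toList).length 0 (by omega)
  simpa [cntQ, cntT, cntE] using h

-- ===== VERDICT (by name: the statement is the Claim_ definition above) =====
theorem position_of_paired_else_spec : Claim_equal_position_of_paired_else := by
  intro s _
  unfold Spec_position_of_paired_else
  rw [a_eq_bfind, b_eq_bfind]
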